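-- pv_equiv track=rewrite | github.com/popoet/crispr_test_project | backend_software/hitom/new/report.py | merge_variants
-- ===== SOURCE A (Python) =====
-- def merge_variants(variant_types, variant_seqs, variant_positions):
--     merged_types = []
--     merged_seqs = []
--     merged_positions = []
--
--     i = 0
--     while i < len(variant_types):
--         current_type = variant_types[i]
--         current_pos = variant_positions[i]
--         current_seq = variant_seqs[i]
--
--         if current_type == "SNP":
--             start_pos = current_pos
--             end_pos = current_pos
--             snp_ref = current_seq[0]
--             snp_alt = current_seq[-1]
--             j = i + 1
--             while j < len(variant_types) and variant_types[j] == "SNP" and variant_positions[j] == end_pos + 1: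
--                 end_pos = variant_positions[j]
--                 snp_ref += variant_seqs[j][0]
--                 snp_alt += variant_seqs[j][-1]
--                 j += 1
--             if start_pos == end_pos:
--                 merged_types.append("SNP")
--                 merged_seqs.append(current_seq)
--                 merged_positions.append(str(start_pos))
--             else:
--                 merged_types.append("SNP")
--                 merged_seqs.append(f"{snp_ref}->{snp_alt}")
--                 merged_positions.append(f"{start_pos}-{end_pos}")
--             i = j
--         elif current_type.endswith("I") or current_type.endswith("D"):
--             length = int(current_type[:-1])
--             start_pos = current_pos
--             end_pos = current_pos
--             combined_seq = current_seq
--             j = i + 1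
--             while j < len(variant_types) and variant_types[j] == current_type and variant_positions[j] == end_pos + 1:
--                 end_pos = variant_positions[j]
--                 combined_seq += variant_seqs[j]
--                 length += int(variant_types[j][:-1])
--                 j += 1
--             merged_types.append(f"{length}{current_type[-1]}")
--             merged_seqs.append(combined_seq)
--             if start_pos == end_pos:
--                 merged_positions.append(str(start_pos))
--             else:
--                 merged_positions.append(f"{start_pos}-{end_pos}")
--             i = j
--         else:
--             merged_types.append(current_type)
--             merged_seqs.append(current_seq)
--             merged_positions.append(str(current_pos))
--             i += 1
--
--     if merged_types.count("SNP") > 1: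
--         merged_types = ["SNP"] + [t for t in merged_types if t != "SNP"]
--
--     return merged_types, merged_seqs, merged_positions
-- ===== SOURCE B (Python) =====
-- def _continues(prev, cur):
--     t, _, p = cur
--     return t == prev[0] and p == prev[2] + 1 and (t == "SNP" or t.endswith("I") or t.endswith("D"))
--
--
-- def _format_run(run):
--     t0, s0, p0 = run[0]
--     pl = run[-1][2]
--     pos = str(p0) if p0 == pl else f"{p0}-{pl}"
--     if t0 == "SNP":
--         if len(run) == 1:
--             return ("SNP", s0, pos)
--         ref = "".join(s[0] for _, s, _ in run)
--         alt = "".join(s[-1] for _, s, _ in run)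
--         return ("SNP", f"{ref}->{alt}", pos)
--     if t0.endswith("I") or t0.endswith("D"):
--         total = sum(int(t[:-1]) for t, _, _ in run)
--         return (f"{total}{t0[-1]}", "".join(s for _, s, _ in run), pos)
--     return (t0, s0, pos)
--
--
-- def merge_variants(variant_types, variant_seqs, variant_positions):
--     # Pass 1: group consecutive mergeable variants into runs (one continuation rule).
--     runs = []
--     for item in zip(variant_types, variant_seqs, variant_positions):
--         if runs and _continues(runs[-1][-1], item):
--             runs[-1].append(item)
--         else:
--             runs.append([item])
--     # Pass 2: format each run independently.
--     formatted = [_format_run(run) for run in runs]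
--     types_out = [f[0] for f in formatted]
--     seqs_out = [f[1] for f in formatted]
--     pos_out = [f[2] for f in formatted]
--     if types_out.count("SNP") > 1:
--         types_out = ["SNP"] + [t for t in types_out if t != "SNP"]
--     return types_out, seqs_out, pos_out
-- ===== Notes on version B (the rewrite author's own statement) =====
-- stated objective: alternative
-- what changed: Replaced A's single index-driven while-loop with nested scan-ahead loops and per-branch incremental accumulation by a two-pass design: one grouping pass that splits the zipped triples into runs under a single continuation predicate, then an independent per-run formatting pass (joins/sum over the run) plus the final SNP reorder.
import Mathlib
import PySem

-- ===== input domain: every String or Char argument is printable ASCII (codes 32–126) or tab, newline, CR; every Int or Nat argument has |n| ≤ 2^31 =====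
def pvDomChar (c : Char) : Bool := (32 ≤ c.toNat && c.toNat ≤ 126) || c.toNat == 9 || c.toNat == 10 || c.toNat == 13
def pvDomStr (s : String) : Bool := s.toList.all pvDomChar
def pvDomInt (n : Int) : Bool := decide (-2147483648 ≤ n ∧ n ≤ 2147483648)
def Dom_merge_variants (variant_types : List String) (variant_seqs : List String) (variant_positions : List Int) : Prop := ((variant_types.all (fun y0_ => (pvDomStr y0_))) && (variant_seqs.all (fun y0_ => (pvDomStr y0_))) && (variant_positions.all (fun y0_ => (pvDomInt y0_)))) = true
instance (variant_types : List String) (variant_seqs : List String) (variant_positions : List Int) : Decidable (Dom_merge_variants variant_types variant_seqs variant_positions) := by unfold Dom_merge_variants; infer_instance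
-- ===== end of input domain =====

-- B replaces A's index-driven while-loop (with nested scan-ahead loops and incremental
-- per-branch accumulation) by two passes: group the zipped triples into runs under one
-- continuation predicate, then format each run independently; objective: alternative.


-- shared thin wrappers for Python primitives used by both sources
-- s[0] / s[-1] as a Char (exact under Pre_, where every indexed string is nonempty)
def pvC0 (s : String) : Char := (PySem.Str.pyGet? s 0).getD ' '
def pvCl (s : String) : Char := (PySem.Str.pyGet? s (-1)).getD ' '
-- int(t[:-1]) (exact under Pre_, where the parse succeeds)
def pvParseID (t : String) : Int := (PySem.Int.ofStr? (PySem.Str.slice t none (some (-1)))).getD 0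

-- ===== PORT A =====
-- inner while loop of the "SNP" branch; consumes the suffix lists, returns
-- ((end_pos, snp_ref, snp_alt), (remaining types, seqs, positions))
def snpLoopA : List String → List String → List Int → Int → String → String →
    (Int × String × String) × (List String × List String × List Int)
  | [], ss, ps, ep, ref, alt => ((ep, ref, alt), ([], ss, ps))
  | t :: ts, ss, ps, ep, ref, alt =>
    if t == "SNP" && ps.headD 0 == ep + 1 then
      snpLoopA ts ss.tail ps.tail (ps.headD 0)
        (ref ++ String.singleton (pvC0 (ss.headD ""))) (alt ++ String.singleton (pvCl (ss.headD "")))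
    else ((ep, ref, alt), (t :: ts, ss, ps))

-- inner while loop of the insertion/deletion branch; returns
-- ((end_pos, combined_seq, length), (remaining types, seqs, positions))
def idLoopA (ct : String) : List String → List String → List Int → Int → String → Int →
    (Int × String × Int) × (List String × List String × List Int)
  | [], ss, ps, ep, comb, len => ((ep, comb, len), ([], ss, ps))
  | t :: ts, ss, ps, ep, comb, len =>
    if t == ct && ps.headD 0 == ep + 1 then
      idLoopA ct ts ss.tail ps.tail (ps.headD 0) (comb ++ ss.headD "") (len + pvParseID t)
    else ((ep, comb, len), (t :: ts, ss, ps))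

theorem snpLoopA_rest_le : ∀ ts ss ps ep ref alt, (snpLoopA ts ss ps ep ref alt).2.1.length ≤ ts.length := by
  intro ts
  induction ts with
  | nil => intro ss ps ep ref alt; simp [snpLoopA]
  | cons t ts ih =>
    intro ss ps ep ref alt
    simp only [snpLoopA]
    split
    · exact Nat.le_succ_of_le (ih ..)
    · simp

theorem idLoopA_rest_le : ∀ ct ts ss ps ep comb len, (idLoopA ct ts ss ps ep comb len).2.1.length ≤ ts.length := by
  intro ct ts
  induction ts with
  | nil => intro ss ps ep comb len; simp [idLoopA]
  | cons t ts ih =>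
    intro ss ps ep comb len
    simp only [idLoopA]
    split
    · exact Nat.le_succ_of_le (ih ..)
    · simp

-- outer while loop of A (the three appended accumulator lists are built as the recursion returns)
def loopA : List String → List String → List Int → List String × List String × List String
  | [], _, _ => ([], [], [])
  | t :: ts, ss, ps =>
    let s := ss.headD ""
    let p := ps.headD 0
    if t == "SNP" then
      let r := snpLoopA ts ss.tail ps.tail p (String.singleton (pvC0 s)) (String.singleton (pvCl s))
      let rest := loopA r.2.1 r.2.2.1 r.2.2.2
      if p == r.1.1 then
        ("SNP" :: rest.1, s :: rest.2.1, PySem.Int.toStr p :: rest.2.2)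
      else
        ("SNP" :: rest.1, (r.1.2.1 ++ "->" ++ r.1.2.2) :: rest.2.1,
         (PySem.Int.toStr p ++ "-" ++ PySem.Int.toStr r.1.1) :: rest.2.2)
    else if PySem.Str.endswith t "I" || PySem.Str.endswith t "D" then
      let r := idLoopA t ts ss.tail ps.tail p s (pvParseID t)
      let rest := loopA r.2.1 r.2.2.1 r.2.2.2
      ((PySem.Int.toStr r.1.2.2 ++ String.singleton (pvCl t)) :: rest.1, r.1.2.1 :: rest.2.1,
       (if p == r.1.1 then PySem.Int.toStr p
        else PySem.Int.toStr p ++ "-" ++ PySem.Int.toStr r.1.1) :: rest.2.2)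
    else
      let rest := loopA ts ss.tail ps.tail
      (t :: rest.1, s :: rest.2.1, PySem.Int.toStr p :: rest.2.2)
termination_by ts _ _ => ts.length
decreasing_by
  · exact Nat.lt_succ_of_le (snpLoopA_rest_le ..)
  · exact Nat.lt_succ_of_le (idLoopA_rest_le ..)
  · simp

def merge_variants (variant_types : List String) (variant_seqs : List String) (variant_positions : List Int) : List String × List String × List String :=
  let m := loopA variant_types variant_seqs variant_positions
  if m.1.count "SNP" > 1 then
    ("SNP" :: m.1.filter (fun t => t != "SNP"), m.2.1, m.2.2)
  else m

-- ===== PORT B =====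
-- the continuation rule of Source B (an item of the zipped lists is (type, (seq, pos)))
def contTriple (prev cur : String × String × Int) : Bool :=
  cur.1 == prev.1 && cur.2.2 == prev.2.2 + 1 &&
    (cur.1 == "SNP" || PySem.Str.endswith cur.1 "I" || PySem.Str.endswith cur.1 "D")

-- one step of the grouping pass: append the item to the last run or start a new run
def addItem (runs : List (List (String × String × Int))) (item : String × String × Int) :
    List (List (String × String × Int)) :=
  match runs.getLast? with
  | some r =>
    match r.getLast? with
    | some prev =>
      if contTriple prev item then runs.dropLast ++ [r ++ [item]] else runs ++ [[item]]
    | none => runs ++ [[item]]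
  | none => runs ++ [[item]]

-- _format_run of Source B
def fmtRun : List (String × String × Int) → String × String × String
  | [] => ("", "", "")   -- unreachable: the grouping pass only builds nonempty runs
  | x :: rest =>
    let run := x :: rest
    let pl := (run.getLast?.getD x).2.2
    let pos := if x.2.2 == pl then PySem.Int.toStr x.2.2
               else PySem.Int.toStr x.2.2 ++ "-" ++ PySem.Int.toStr pl
    if x.1 == "SNP" then
      if run.length == 1 then ("SNP", x.2.1, pos)
      else
        ("SNP",
         PySem.Str.join "" (run.map (fun it => String.singleton (pvC0 it.2.1))) ++ "->" ++
           PySem.Str.join "" (run.map (fun it => String.singleton (pvCl it.2.1))), pos)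
    else if PySem.Str.endswith x.1 "I" || PySem.Str.endswith x.1 "D" then
      (PySem.Int.toStr ((run.map (fun it => pvParseID it.1)).sum) ++ String.singleton (pvCl x.1),
       PySem.Str.join "" (run.map (fun it => it.2.1)), pos)
    else (x.1, x.2.1, pos)

def merge_variants_alt (variant_types : List String) (variant_seqs : List String) (variant_positions : List Int) : List String × List String × List String :=
  let runs := (variant_types.zip (variant_seqs.zip variant_positions)).foldl addItem []
  let formatted := runs.map fmtRun
  let types_out := formatted.map (fun f => f.1)
  let seqs_out := formatted.map (fun f => f.2.1)
  let pos_out := formatted.map (fun f => f.2.2)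
  if types_out.count "SNP" > 1 then
    ("SNP" :: types_out.filter (fun t => t != "SNP"), seqs_out, pos_out)
  else (types_out, seqs_out, pos_out)

-- ===== PRECONDITION & SPEC =====
-- Pre_ = exactly the inputs on which A returns: both value lists at least as long as the
-- type list (every index is read), every "SNP" entry's seq nonempty (s[0]/s[-1] would
-- raise IndexError), and every type ending in "I"/"D" with an int()-parsable prefix
-- (int(t[:-1]) would raise ValueError).
def Pre_merge_variants (variant_types : List String) (variant_seqs : List String) (variant_positions : List Int) : Prop :=
  variant_types.length ≤ variant_seqs.length ∧
  variant_types.length ≤ variant_positions.length ∧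
  ∀ i ∈ List.range variant_types.length,
    (variant_types.getD i "" = "SNP" → variant_seqs.getD i "" ≠ "") ∧
    ((PySem.Str.endswith (variant_types.getD i "") "I" = true ∨
      PySem.Str.endswith (variant_types.getD i "") "D" = true) →
      (PySem.Int.ofStr? (PySem.Str.slice (variant_types.getD i "") none (some (-1)))).isSome = true)
instance (variant_types : List String) (variant_seqs : List String) (variant_positions : List Int) : Decidable (Pre_merge_variants variant_types variant_seqs variant_positions) := by unfold Pre_merge_variants; infer_instance

def pvWitness_merge_variants : List String × List String × List Int :=
  (["SNP", "SNP", "2I", "1I", "X"], ["A>G", "C>T", "AT", "G", "Q"], [5, 6, 9, 10, 12])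

def Spec_merge_variants (variant_types : List String) (variant_seqs : List String) (variant_positions : List Int) (out : List String × List String × List String) : Prop := out = merge_variants_alt variant_types variant_seqs variant_positions
instance (variant_types : List String) (variant_seqs : List String) (variant_positions : List Int) (out : List String × List String × List String) : Decidable (Spec_merge_variants variant_types variant_seqs variant_positions out) := by unfold Spec_merge_variants; infer_instance

-- ===== CLAIM (what is proved, stated in full; the proofs are below) =====
def Claim_equal_merge_variants : Prop := ∀ (variant_types : List String) (variant_seqs : List String) (variant_positions : List Int), Dom_merge_variants variant_types variant_seqs variant_positions → Pre_merge_variants variant_types variant_seqs variant_positions → Spec_merge_variants variant_types variant_seqs variant_positions (merge_variants variant_types variant_seqs variant_positions)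

-- ===== LEMMAS AND PROOFS =====

-- recursive characterisation of the grouping pass
def takeRun (prev : String × String × Int) : List (String × String × Int) →
    List (String × String × Int) × List (String × String × Int)
  | [] => ([], [])
  | y :: ys => if contTriple prev y then
      let r := takeRun y ys; (y :: r.1, r.2)
    else ([], y :: ys)

theorem takeRun_rest_le : ∀ prev l, (takeRun prev l).2.length ≤ l.length := by
  intro prev l
  induction l generalizing prev with
  | nil => simp [takeRun]
  | cons y ys ih =>
    by_cases h : contTriple prev y = true
    · simp only [takeRun, h, if_pos]
      exact Nat.le_succ_of_le (ih y)
    · simp [takeRun, h]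

def splitRuns : List (String × String × Int) → List (List (String × String × Int))
  | [] => []
  | x :: xs => (x :: (takeRun x xs).1) :: splitRuns (takeRun x xs).2
termination_by l => l.length
decreasing_by exact Nat.lt_succ_of_le (takeRun_rest_le ..)

theorem takeRun_cons_pos {prev y : String × String × Int} {ys : List (String × String × Int)}
    (hc : contTriple prev y = true) :
    takeRun prev (y :: ys) = (y :: (takeRun y ys).1, (takeRun y ys).2) := by
  simp [takeRun, hc]

theorem takeRun_cons_neg {prev y : String × String × Int} {ys : List (String × String × Int)}
    (hc : contTriple prev y = false) :
    takeRun prev (y :: ys) = ([], y :: ys) := by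
  simp [takeRun, hc]

theorem addItem_extend {runs : List (List (String × String × Int))} {r : List (String × String × Int)}
    {prev y : String × String × Int} (h : r.getLast? = some prev) (hc : contTriple prev y = true) :
    addItem (runs ++ [r]) y = runs ++ [r ++ [y]] := by
  simp [addItem, h, hc]

theorem addItem_new {runs : List (List (String × String × Int))} {r : List (String × String × Int)}
    {prev y : String × String × Int} (h : r.getLast? = some prev) (hc : contTriple prev y = false) :
    addItem (runs ++ [r]) y = (runs ++ [r]) ++ [[y]] := by
  simp [addItem, h, hc]

theorem foldl_addItem_concat (items : List (String × String × Int)) :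
    ∀ acc r prev, r.getLast? = some prev →
      List.foldl addItem (acc ++ [r]) items =
        acc ++ (r ++ (takeRun prev items).1) :: splitRuns (takeRun prev items).2 := by
  induction items with
  | nil => intro acc r prev h; simp [takeRun, splitRuns]
  | cons y ys ih =>
    intro acc r prev h
    by_cases hc : contTriple prev y = true
    · rw [List.foldl_cons, addItem_extend h hc,
        ih acc (r ++ [y]) y List.getLast?_concat, takeRun_cons_pos hc]
      simp
    · rw [Bool.not_eq_true] at hc
      rw [List.foldl_cons, addItem_new h hc,
        ih (acc ++ [r]) [y] y rfl, takeRun_cons_neg hc]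
      have : splitRuns (y :: ys) = (y :: (takeRun y ys).1) :: splitRuns (takeRun y ys).2 := by
        simp [splitRuns]
      simp [this]

theorem group_eq (items : List (String × String × Int)) :
    items.foldl addItem [] = splitRuns items := by
  cases items with
  | nil => simp [splitRuns]
  | cons x xs =>
    have h0 : addItem [] x = [] ++ [[x]] := rfl
    rw [List.foldl_cons, h0, foldl_addItem_concat xs [] [x] x rfl]
    simp [splitRuns]

-- the three output lists of B, as a function of the run list
def fmtAll (rs : List (List (String × String × Int))) : List String × List String × List String :=
  ((rs.map fmtRun).map (fun f => f.1), (rs.map fmtRun).map (fun f => f.2.1),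
   (rs.map fmtRun).map (fun f => f.2.2))

theorem pvIntercalate_nil (l : List (List Char)) : List.intercalate ([] : List Char) l = l.flatten := by
  induction l with
  | nil => rfl
  | cons x xs ih => cases xs <;> simp_all [List.intercalate, List.intersperse]

theorem pvJoin_empty_cons (x : String) (xs : List String) :
    PySem.Str.join "" (x :: xs) = x ++ PySem.Str.join "" xs := by
  simp [PySem.Str.join, PySem.Chars.join, pvIntercalate_nil]

theorem contTriple_snp (sp : String) (ep : Int) (y : String × String × Int) :
    contTriple ("SNP", sp, ep) y = (y.1 == "SNP" && y.2.2 == ep + 1) := by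
  by_cases hy : y.1 = "SNP" <;> simp [contTriple, hy]

theorem contTriple_id (ct : String) (h : (PySem.Str.endswith ct "I" || PySem.Str.endswith ct "D") = true)
    (sp : String) (ep : Int) (y : String × String × Int) :
    contTriple (ct, sp, ep) y = (y.1 == ct && y.2.2 == ep + 1) := by
  by_cases hy : y.1 = ct
  · simp only [PySem.Str.endswith_eq] at h
    rcases Bool.or_eq_true_iff.mp h with h1 | h1 <;> simp_all [contTriple]
  · simp [contTriple, hy]

theorem snpLoopA_eq : ∀ (ts ss : List String) (ps : List Int) (ep : Int) (ref alt sp : String),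
    ts.length ≤ ss.length → ts.length ≤ ps.length →
    snpLoopA ts ss ps ep ref alt =
      ((ep + ((takeRun ("SNP", sp, ep) (ts.zip (ss.zip ps))).1.length : Int),
        ref ++ PySem.Str.join "" ((takeRun ("SNP", sp, ep) (ts.zip (ss.zip ps))).1.map
          (fun it => String.singleton (pvC0 it.2.1))),
        alt ++ PySem.Str.join "" ((takeRun ("SNP", sp, ep) (ts.zip (ss.zip ps))).1.map
          (fun it => String.singleton (pvCl it.2.1)))),
       (ts.drop (takeRun ("SNP", sp, ep) (ts.zip (ss.zip ps))).1.length,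
        ss.drop (takeRun ("SNP", sp, ep) (ts.zip (ss.zip ps))).1.length,
        ps.drop (takeRun ("SNP", sp, ep) (ts.zip (ss.zip ps))).1.length)) := by
  intro ts
  induction ts with
  | nil =>
    intro ss ps ep ref alt sp _ _
    simp [snpLoopA, takeRun, PySem.Str.join, PySem.Chars.join, List.intercalate]
  | cons t ts ih =>
    intro ss ps ep ref alt sp h1 h2
    cases ss with
    | nil => simp at h1
    | cons s ss =>
      cases ps with
      | nil => simp at h2
      | cons p ps =>
        simp only [List.length_cons, Nat.succ_le_succ_iff] at h1 h2
        simp only [List.zip_cons_cons]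
        by_cases hc : contTriple ("SNP", sp, ep) (t, s, p) = true
        · have hb : (t == "SNP" && p == ep + 1) = true := by
            rw [← contTriple_snp sp ep (t, s, p)]; exact hc
          obtain ⟨ht, hp⟩ := Bool.and_eq_true .. |>.mp hb
          have ht' : t = "SNP" := beq_iff_eq.mp ht
          have hp' : p = ep + 1 := beq_iff_eq.mp hp
          rw [takeRun_cons_pos hc]
          simp only [snpLoopA, List.headD_cons, List.tail_cons, hb, if_pos]
          subst ht' hp'
          rw [ih ss ps (ep + 1) _ _ s h1 h2]
          simp only [List.map_cons, pvJoin_empty_cons, List.length_cons, List.drop_succ_cons,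
            String.append_assoc, Prod.mk.injEq, and_true]
          push_cast
          ring
        · rw [Bool.not_eq_true] at hc
          have hb : (t == "SNP" && p == ep + 1) = false := by
            rw [← contTriple_snp sp ep (t, s, p)]; exact hc
          rw [takeRun_cons_neg hc]
          simp only [snpLoopA, List.headD_cons, List.tail_cons, hb, Bool.false_eq_true, if_false]
          simp [PySem.Str.join, PySem.Chars.join, List.intercalate]

theorem idLoopA_eq : ∀ (ct : String), (PySem.Str.endswith ct "I" || PySem.Str.endswith ct "D") = true →
    ∀ (ts ss : List String) (ps : List Int) (ep : Int) (comb : String) (len : Int) (sp : String),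
    ts.length ≤ ss.length → ts.length ≤ ps.length →
    idLoopA ct ts ss ps ep comb len =
      ((ep + ((takeRun (ct, sp, ep) (ts.zip (ss.zip ps))).1.length : Int),
        comb ++ PySem.Str.join "" ((takeRun (ct, sp, ep) (ts.zip (ss.zip ps))).1.map (fun it => it.2.1)),
        len + ((takeRun (ct, sp, ep) (ts.zip (ss.zip ps))).1.map (fun it => pvParseID it.1)).sum),
       (ts.drop (takeRun (ct, sp, ep) (ts.zip (ss.zip ps))).1.length,
        ss.drop (takeRun (ct, sp, ep) (ts.zip (ss.zip ps))).1.length,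
        ps.drop (takeRun (ct, sp, ep) (ts.zip (ss.zip ps))).1.length)) := by
  intro ct hct ts
  induction ts with
  | nil =>
    intro ss ps ep comb len sp _ _
    simp [idLoopA, takeRun, PySem.Str.join, PySem.Chars.join, List.intercalate]
  | cons t ts ih =>
    intro ss ps ep comb len sp h1 h2
    cases ss with
    | nil => simp at h1
    | cons s ss =>
      cases ps with
      | nil => simp at h2
      | cons p ps =>
        simp only [List.length_cons, Nat.succ_le_succ_iff] at h1 h2
        simp only [List.zip_cons_cons]
        by_cases hc : contTriple (ct, sp, ep) (t, s, p) = true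
        · have hb : (t == ct && p == ep + 1) = true := by
            rw [← contTriple_id ct hct sp ep (t, s, p)]; exact hc
          obtain ⟨ht, hp⟩ := Bool.and_eq_true .. |>.mp hb
          have ht' : t = ct := beq_iff_eq.mp ht
          have hp' : p = ep + 1 := beq_iff_eq.mp hp
          rw [takeRun_cons_pos hc]
          simp only [idLoopA, List.headD_cons, List.tail_cons, hb, if_pos]
          subst ht' hp'
          rw [ih ss ps (ep + 1) _ _ s h1 h2]
          simp only [List.map_cons, pvJoin_empty_cons, List.length_cons, List.drop_succ_cons,
            List.sum_cons, String.append_assoc, Prod.mk.injEq, and_true, true_and]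
          push_cast
          refine ⟨by ring, by ring⟩
        · rw [Bool.not_eq_true] at hc
          have hb : (t == ct && p == ep + 1) = false := by
            rw [← contTriple_id ct hct sp ep (t, s, p)]; exact hc
          rw [takeRun_cons_neg hc]
          simp only [idLoopA, List.headD_cons, List.tail_cons, hb, Bool.false_eq_true, if_false]
          simp [PySem.Str.join, PySem.Chars.join, List.intercalate]

theorem takeRun_last : ∀ (l : List (String × String × Int)) (prev : String × String × Int),
    (((prev :: (takeRun prev l).1).getLast?.getD prev).2.2) = prev.2.2 + ((takeRun prev l).1.length : Int) := by
  intro l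
  induction l with
  | nil => intro prev; simp [takeRun]
  | cons y ys ih =>
    intro prev
    by_cases hc : contTriple prev y = true
    · rw [takeRun_cons_pos hc]
      have hpos : y.2.2 = prev.2.2 + 1 := by
        have := (Bool.and_eq_true ..).mp ((Bool.and_eq_true ..).mp hc).1
        exact beq_iff_eq.mp this.2
      have hyy := ih y
      cases hz : (y :: (takeRun y ys).1).getLast? with
      | none => simp at hz
      | some z =>
        rw [hz] at hyy
        simp only [List.getLast?_cons_cons, hz, Option.getD_some] at hyy ⊢
        simp only [List.length_cons]
        push_cast
        omega
    · rw [Bool.not_eq_true] at hc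
      rw [takeRun_cons_neg hc]
      simp

theorem takeRun_none (x : String × String × Int) (l : List (String × String × Int))
    (h : (x.1 == "SNP" || PySem.Str.endswith x.1 "I" || PySem.Str.endswith x.1 "D") = false) :
    takeRun x l = ([], l) := by
  cases l with
  | nil => simp [takeRun]
  | cons y ys =>
    have hcf : contTriple x y = false := by
      by_cases hy : y.1 = x.1
      · simp only [PySem.Str.endswith_eq, Bool.or_eq_false_iff] at h
        simp_all [contTriple]
      · simp [contTriple, hy]
    exact takeRun_cons_neg hcf

theorem pvZip_drop {α β : Type} (a : List α) (b : List β) (n : Nat) :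
    (a.zip b).drop n = (a.drop n).zip (b.drop n) := by
  simp [List.zip, List.drop_zipWith]

theorem takeRun_snd_eq_drop : ∀ (l : List (String × String × Int)) (prev : String × String × Int),
    (takeRun prev l).2 = l.drop (takeRun prev l).1.length := by
  intro l
  induction l with
  | nil => intro prev; simp [takeRun]
  | cons y ys ih =>
    intro prev
    by_cases hc : contTriple prev y = true
    · rw [takeRun_cons_pos hc]
      simpa using ih y
    · rw [Bool.not_eq_true] at hc
      rw [takeRun_cons_neg hc]
      simp

theorem splitRuns_cons (x : String × String × Int) (xs : List (String × String × Int)) :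
    splitRuns (x :: xs) = (x :: (takeRun x xs).1) :: splitRuns (takeRun x xs).2 := by
  simp [splitRuns]

theorem fmtAll_cons (r : List (String × String × Int)) (rs : List (List (String × String × Int))) :
    fmtAll (r :: rs) = ((fmtRun r).1 :: (fmtAll rs).1, (fmtRun r).2.1 :: (fmtAll rs).2.1,
      (fmtRun r).2.2 :: (fmtAll rs).2.2) := by
  simp [fmtAll]

theorem loopA_eq : ∀ (n : Nat) (ts ss : List String) (ps : List Int), ts.length ≤ n →
    ts.length ≤ ss.length → ts.length ≤ ps.length →
    loopA ts ss ps = fmtAll (splitRuns (ts.zip (ss.zip ps))) := by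
  intro n
  induction n with
  | zero =>
    intro ts ss ps h0 _ _
    have hts : ts = [] := List.eq_nil_of_length_eq_zero (Nat.le_zero.mp h0)
    subst hts
    simp [loopA, splitRuns, fmtAll]
  | succ n ih =>
    intro ts ss ps h0 h1 h2
    cases ts with
    | nil => simp [loopA, splitRuns, fmtAll]
    | cons t ts =>
      cases ss with
      | nil => simp at h1
      | cons s ss =>
        cases ps with
        | nil => simp at h2
        | cons p ps =>
          simp only [List.length_cons, Nat.succ_le_succ_iff] at h0 h1 h2
          simp only [List.zip_cons_cons, splitRuns_cons]
          by_cases ht : t = "SNP"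
          · subst ht
            rw [loopA.eq_def]
            simp only [List.headD_cons, List.tail_cons, BEq.rfl, if_pos]
            rw [snpLoopA_eq ts ss ps p _ _ s h1 h2]
            have hk := takeRun_last (ts.zip (ss.zip ps)) ("SNP", s, p)
            set tr := takeRun ("SNP", s, p) (ts.zip (ss.zip ps)) with htr
            have h22 : tr.2 = (ts.zip (ss.zip ps)).drop tr.1.length := by
              rw [htr]; exact takeRun_snd_eq_drop ..
            have hrec : loopA (ts.drop tr.1.length) (ss.drop tr.1.length) (ps.drop tr.1.length) =
                fmtAll (splitRuns tr.2) := by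
              rw [ih _ _ _ (by rw [List.length_drop]; exact le_trans (Nat.sub_le ..) h0)
                (by rw [List.length_drop, List.length_drop]; exact Nat.sub_le_sub_right h1 _)
                (by rw [List.length_drop, List.length_drop]; exact Nat.sub_le_sub_right h2 _),
                h22, pvZip_drop, pvZip_drop]
            simp only [hrec, fmtAll_cons]
            by_cases hk0 : tr.1 = []
            · simp [fmtRun, hk0]
            · have hlen : 0 < tr.1.length := List.length_pos_of_ne_nil hk0
              have hne : ¬ (p = p + (tr.1.length : Int)) := by omega
              cases htr1 : tr.1 with
              | nil => exact absurd htr1 hk0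
              | cons y ys =>
                have hk' : ((y :: ys).getLast?.getD ("SNP", s, p)).2.2 = p + ((ys.length : Int) + 1) := by
                  rw [htr1] at hk
                  simp only [List.getLast?_cons_cons, List.length_cons] at hk
                  push_cast at hk
                  simpa using hk
                have hc1 : ¬ ((ys.length : Int) + 1 = 0) := by omega
                have hc2 : ¬ (p = ((y :: ys).getLast?.getD ("SNP", s, p)).2.2) := by
                  rw [hk']; omega
                simp [fmtRun, hk', hc1, pvJoin_empty_cons, String.append_assoc]
          · rw [loopA.eq_def]
            have hts : (t == "SNP") = false := by simp [ht]
            by_cases hd : (PySem.Str.endswith t "I" || PySem.Str.endswith t "D") = true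
            · simp only [List.headD_cons, List.tail_cons, hts, Bool.false_eq_true, if_false, hd,
                if_pos]
              rw [idLoopA_eq t hd ts ss ps p s (pvParseID t) s h1 h2]
              have hk := takeRun_last (ts.zip (ss.zip ps)) (t, s, p)
              set tr := takeRun (t, s, p) (ts.zip (ss.zip ps)) with htr
              have h22 : tr.2 = (ts.zip (ss.zip ps)).drop tr.1.length := by
                rw [htr]; exact takeRun_snd_eq_drop ..
              have hrec : loopA (ts.drop tr.1.length) (ss.drop tr.1.length) (ps.drop tr.1.length) =
                  fmtAll (splitRuns tr.2) := by
                rw [ih _ _ _ (by rw [List.length_drop]; exact le_trans (Nat.sub_le ..) h0)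
                  (by rw [List.length_drop, List.length_drop]; exact Nat.sub_le_sub_right h1 _)
                  (by rw [List.length_drop, List.length_drop]; exact Nat.sub_le_sub_right h2 _),
                  h22, pvZip_drop, pvZip_drop]
              simp only [hrec, fmtAll_cons]
              have hd' : PySem.Chars.endswith t.toList ['I'] = true ∨
                  PySem.Chars.endswith t.toList ['D'] = true := by
                simpa [PySem.Str.endswith_eq] using Bool.or_eq_true_iff.mp hd
              simp [fmtRun, hk, hts, hd', pvJoin_empty_cons, String.append_assoc]
            · rw [Bool.not_eq_true] at hd
              have htr0 : takeRun (t, s, p) (ts.zip (ss.zip ps)) = ([], ts.zip (ss.zip ps)) := by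
                refine takeRun_none (t, s, p) _ ?_
                simp only [Bool.or_eq_false_iff] at hd ⊢
                exact ⟨⟨hts, hd.1⟩, hd.2⟩
              simp only [List.headD_cons, List.tail_cons, hts, Bool.false_eq_true, if_false, hd]
              rw [ih ts ss ps h0 h1 h2]
              rw [htr0]
              have hd2 := Bool.or_eq_false_iff.mp hd
              have hd' : ¬ (PySem.Chars.endswith t.toList ['I'] = true ∨
                  PySem.Chars.endswith t.toList ['D'] = true) := by
                simpa [PySem.Str.endswith_eq, not_or] using hd2
              simp [fmtRun, fmtAll_cons, hts, hd']

theorem merge_variants_eq (ts ss : List String) (ps : List Int)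
    (h1 : ts.length ≤ ss.length) (h2 : ts.length ≤ ps.length) :
    merge_variants ts ss ps = merge_variants_alt ts ss ps := by
  unfold merge_variants merge_variants_alt
  rw [group_eq, loopA_eq ts.length ts ss ps le_rfl h1 h2]
  rfl

-- ===== VERDICT (by name: the statement is the Claim_ definition above) =====
theorem merge_variants_spec : Claim_equal_merge_variants := by
  intro ts ss ps _ hpre
  unfold Spec_merge_variants
  exact merge_variants_eq ts ss ps hpre.1 hpre.2.1
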